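-- pv_equiv track=rewrite | github.com/miliar/Code_Jam_Webscraper | solutions_python/Problem_149/45.py | check
-- ===== SOURCE A (Python) =====
-- def check(arr):
-- 	st = 0
-- 	ol = None
-- 	for i in arr:
-- 		if st == 0:
-- 			st = 1
-- 		elif st == 1:
-- 			if i <= ol:
-- 				st = 2
-- 		elif st == 2:
-- 			if i>= ol:
-- 				return False
-- 		ol = i
-- 	return True
-- ===== SOURCE B (Python) =====
-- def check(arr):
--     # Two-phase scan over adjacent pairs: drop the strictly-increasing prefix,
--     # skip the transition pair (it may be equal), then every later pair must
--     # strictly decrease.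
--     rest = list(zip(arr, arr[1:]))
--     while rest and rest[0][0] < rest[0][1]:
--         rest = rest[1:]
--     return all(a > b for a, b in rest[1:])
-- ===== Notes on version B (the rewrite author's own statement) =====
-- stated objective: simpler
-- what changed: Replaced the three-state machine with remembered previous element by a two-phase scan over the list of adjacent pairs: drop the strictly-increasing prefix, skip the (possibly equal) transition pair, require all remaining pairs strictly decreasing.
import Mathlib
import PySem

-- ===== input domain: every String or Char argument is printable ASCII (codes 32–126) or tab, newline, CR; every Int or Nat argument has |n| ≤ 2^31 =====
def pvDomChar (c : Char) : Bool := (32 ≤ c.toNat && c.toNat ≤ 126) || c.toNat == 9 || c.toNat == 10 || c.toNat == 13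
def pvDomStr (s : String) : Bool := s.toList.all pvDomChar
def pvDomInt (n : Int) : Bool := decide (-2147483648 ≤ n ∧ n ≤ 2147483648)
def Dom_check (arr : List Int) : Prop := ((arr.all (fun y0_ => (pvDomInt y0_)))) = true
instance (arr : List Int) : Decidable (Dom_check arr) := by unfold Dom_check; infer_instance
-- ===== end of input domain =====

-- B replaces A's three-state machine by a two-phase scan over adjacent pairs (simpler decomposition, same O(n) cost).


-- ===== PORT A =====
-- A's loop: st ∈ {0,1,2}, ol is the previous element (None only before the first
-- iteration, where it is never compared; ol.getD 0 is thus never read at none).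
def checkGo (st : Int) (ol : Option Int) : List Int → Bool
  | [] => true
  | i :: rest =>
    if st = 0 then checkGo 1 (some i) rest
    else if st = 1 then
      if i ≤ ol.getD 0 then checkGo 2 (some i) rest else checkGo 1 (some i) rest
    else
      if i ≥ ol.getD 0 then false else checkGo 2 (some i) rest

def check (arr : List Int) : Bool := checkGo 0 none arr

-- ===== PORT B =====
-- 'while rest and rest[0][0] < rest[0][1]: rest = rest[1:]'
def dropIncr : List (Int × Int) → List (Int × Int)
  | [] => []
  | (a, b) :: r => if a < b then dropIncr r else (a, b) :: r

def check_alt (arr : List Int) : Bool :=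
  let pairs := arr.zip (arr.drop 1)
  ((dropIncr pairs).drop 1).all (fun p => decide (p.1 > p.2))

-- ===== PRECONDITION & SPEC =====
def Spec_check (arr : List Int) (out : Bool) : Prop := out = check_alt arr
instance (arr : List Int) (out : Bool) : Decidable (Spec_check arr out) := by unfold Spec_check; infer_instance

-- ===== CLAIM (what is proved, stated in full; the proofs are below) =====
def Claim_equal_check : Prop := ∀ (arr : List Int), Dom_check arr → Spec_check arr (check arr)

-- ===== LEMMAS AND PROOFS =====

-- adjacent pairs, starting from previous element o
def pairsFrom (o : Int) : List Int → List (Int × Int)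
  | [] => []
  | i :: r => (o, i) :: pairsFrom i r

theorem zip_eq_pairsFrom : ∀ (l : List Int) (o : Int), (o :: l).zip l = pairsFrom o l
  | [], _ => rfl
  | i :: r, o => by simpa [pairsFrom, List.zip, List.zipWith] using zip_eq_pairsFrom r i

theorem down_eq : ∀ (l : List Int) (o : Int),
    checkGo 2 (some o) l = (pairsFrom o l).all (fun p => decide (p.1 > p.2))
  | [], _ => rfl
  | i :: r, o => by
    simp only [checkGo, pairsFrom, List.all_cons]
    by_cases h : i ≥ o
    · simp [h, show ¬ (o > i) by omega]
    · simp [h, show o > i by omega, down_eq r i]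

theorem up_eq : ∀ (l : List Int) (o : Int),
    checkGo 1 (some o) l
      = ((dropIncr (pairsFrom o l)).drop 1).all (fun p => decide (p.1 > p.2))
  | [], _ => rfl
  | i :: r, o => by
    simp only [checkGo, pairsFrom, dropIncr]
    by_cases h : i ≤ o
    · simp [h, show ¬ (o < i) by omega, down_eq r i]
    · simp [h, show o < i by omega, up_eq r i]

-- ===== VERDICT (by name: the statement is the Claim_ definition above) =====
theorem check_spec : Claim_equal_check := by
  intro arr _
  unfold Spec_check check check_alt
  cases arr with
  | nil => rfl
  | cons x rest =>
    rw [List.drop_one, List.tail_cons, zip_eq_pairsFrom, ← up_eq]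
    simp [checkGo]
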